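-- pv_equiv track=rewrite | github.com/dhawal-mehta/DSA | Bit-manipulation/Xor queries.py | solve
-- ===== SOURCE A (Python) =====
-- def solve( A, B):
--     n=len(A)
--     pre=[0]*(n+1)
--     for i in range(n):
--         pre[i+1]+=pre[i]
--         pre[i+1]+=A[i]
--     ans=[]
--     m=len(B)
--     for i in range(m):
--         l=B[i][0]
--         r=B[i][1]
--         ones=pre[r]-pre[l-1]
--         xor=0
--         if(ones%2):
--             xor=1
--         ans.append([xor,r-l+1-ones])
--     return ans
-- ===== SOURCE B (Python) =====
-- def solve(A, B):
--     # Table of head sums built by direct slicing (no accumulation, no mutation).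
--     n = len(A)
--     heads = [sum(A[:k]) for k in range(n + 1)]
--     out = []
--     for q in B:
--         l, r = q[0], q[1]
--         ones = heads[r] - heads[l - 1]
--         out.append([ones % 2, r - l + 1 - ones])
--     return out
-- ===== Notes on version B (the rewrite author's own statement) =====
-- stated objective: alternative
-- what changed: Replaces the in-place accumulated prefix array (pre[i+1] += pre[i]; pre[i+1] += A[i]) with a table of head sums each recomputed directly by slicing, and the explicit xor branch with arithmetic ones % 2; trades the O(n) table build for O(n^2).
import Mathlib
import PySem

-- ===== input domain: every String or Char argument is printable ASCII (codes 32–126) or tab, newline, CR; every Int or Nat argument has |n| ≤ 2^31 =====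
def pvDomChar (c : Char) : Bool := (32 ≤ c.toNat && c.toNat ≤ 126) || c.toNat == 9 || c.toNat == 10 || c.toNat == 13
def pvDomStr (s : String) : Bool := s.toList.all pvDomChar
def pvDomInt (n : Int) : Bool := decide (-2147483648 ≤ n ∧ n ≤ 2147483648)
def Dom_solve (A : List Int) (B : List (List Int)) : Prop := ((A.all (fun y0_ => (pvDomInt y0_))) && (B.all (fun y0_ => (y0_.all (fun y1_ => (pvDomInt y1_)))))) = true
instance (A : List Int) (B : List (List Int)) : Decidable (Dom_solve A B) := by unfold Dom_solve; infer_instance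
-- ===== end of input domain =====

-- B replaces A's in-place accumulated prefix array with head sums each recomputed directly by slicing (alternative decomposition, no mutation).

-- ===== PORT A =====
def solve (A : List Int) (B : List (List Int)) : List (List Int) :=
  let n : Int := (A.length : Int)
  let pre : List Int := List.replicate (A.length + 1) 0
  let pre := (PySem.List.pyRange 0 n 1).foldl (fun pre i =>
      let pre := PySem.List.pySetD pre (i+1) (PySem.List.pyGetD pre (i+1) 0 + PySem.List.pyGetD pre i 0)
      PySem.List.pySetD pre (i+1) (PySem.List.pyGetD pre (i+1) 0 + PySem.List.pyGetD A i 0)) pre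
  B.foldl (fun ans q =>
      let l := PySem.List.pyGetD q 0 0
      let r := PySem.List.pyGetD q 1 0
      let ones := PySem.List.pyGetD pre r 0 - PySem.List.pyGetD pre (l-1) 0
      let xor : Int := if PySem.Int.mod ones 2 ≠ 0 then 1 else 0
      ans ++ [[xor, r - l + 1 - ones]]) []

-- ===== PORT B =====
def solve_alt (A : List Int) (B : List (List Int)) : List (List Int) :=
  let n : Int := (A.length : Int)
  let heads : List Int := (PySem.List.pyRange 0 (n + 1) 1).map (fun k => (PySem.List.slice A none (some k)).sum)
  B.foldl (fun out q =>
      let l := PySem.List.pyGetD q 0 0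
      let r := PySem.List.pyGetD q 1 0
      let ones := PySem.List.pyGetD heads r 0 - PySem.List.pyGetD heads (l-1) 0
      out ++ [[PySem.Int.mod ones 2, r - l + 1 - ones]]) []

-- ===== PRECONDITION & SPEC =====
-- Pre_ = exactly the inputs on which A returns: every query has two entries and both prefix-table indices r and
-- l-1 lie in Python's valid index range [-(n+1), n] of the length-(n+1) table (outside, A raises IndexError).
def Pre_solve (A : List Int) (B : List (List Int)) : Prop :=
  ∀ q ∈ B, 2 ≤ q.length ∧
    (-(( A.length : Int) + 1) ≤ q.getD 1 0 ∧ q.getD 1 0 ≤ (A.length : Int)) ∧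
    (-(( A.length : Int) + 1) ≤ q.getD 0 0 - 1 ∧ q.getD 0 0 - 1 ≤ (A.length : Int))
instance (A : List Int) (B : List (List Int)) : Decidable (Pre_solve A B) := by unfold Pre_solve; infer_instance
def pvWitness_solve : List Int × List (List Int) := ([1, 0, 1], [[1, 2], [0, 3], [2, -1]])

def Spec_solve (A : List Int) (B : List (List Int)) (out : List (List Int)) : Prop := out = solve_alt A B
instance (A : List Int) (B : List (List Int)) (out : List (List Int)) : Decidable (Spec_solve A B out) := by unfold Spec_solve; infer_instance

-- ===== CLAIM (what is proved, stated in full; the proofs are below) =====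
def Claim_equal_solve : Prop := ∀ (A : List Int) (B : List (List Int)), Dom_solve A B → Pre_solve A B → Spec_solve A B (solve A B)

-- ===== LEMMAS AND PROOFS =====

-- the prefix table after processing the first j elements: entries up to j are prefix sums, the rest still 0
def preState (A : List Int) (j : Nat) : List Int :=
  (List.range (A.length + 1)).map (fun k => if k ≤ j then (A.take k).sum else 0)

lemma preState_getD (A : List Int) (j m : Nat) :
    (preState A j).getD m 0 = if m ≤ A.length then (if m ≤ j then (A.take m).sum else 0) else 0 := by
  simp [preState, List.getD_eq_getElem?_getD, List.getElem?_map]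
  split_ifs <;> simp_all

lemma preState_length (A : List Int) (j : Nat) : (preState A j).length = A.length + 1 := by
  simp [preState]

lemma preState_step (A : List Int) (j : Nat) (hj : j < A.length) :
    PySem.List.pySetD
      (PySem.List.pySetD (preState A j) ((j : Int) + 1)
        (PySem.List.pyGetD (preState A j) ((j : Int) + 1) 0 + PySem.List.pyGetD (preState A j) (j : Int) 0))
      ((j : Int) + 1)
      (PySem.List.pyGetD
        (PySem.List.pySetD (preState A j) ((j : Int) + 1)
          (PySem.List.pyGetD (preState A j) ((j : Int) + 1) 0 + PySem.List.pyGetD (preState A j) (j : Int) 0))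
        ((j : Int) + 1) 0 + PySem.List.pyGetD A (j : Int) 0)
    = preState A (j + 1) := by
  have hcast : (j : Int) + 1 = ((j + 1 : Nat) : Int) := by push_cast; ring
  rw [hcast]
  simp only [PySem.List.pySetD_natCast, PySem.List.pyGetD_natCast]
  rw [preState_getD, preState_getD]
  rw [if_pos (by omega : j + 1 ≤ A.length), if_neg (by omega : ¬ j + 1 ≤ j),
      if_pos (by omega : j ≤ A.length), if_pos (le_refl j)]
  have hlen : j + 1 < (preState A j).length := by rw [preState_length]; omega
  rw [List.getD_eq_getElem _ _ (by simpa using hlen), List.getElem_set_self, List.set_set]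
  apply List.ext_getElem
  · simp [preState]
  intro k hk1 hk2
  rw [List.getElem_set]
  have hk : k < A.length + 1 := by simpa [preState_length] using hk2
  by_cases hkj : j + 1 = k
  · rw [if_pos hkj]
    subst hkj
    simp [preState, List.sum_take_succ A j hj, List.getElem?_eq_getElem hj]
  · rw [if_neg hkj]
    simp only [preState, List.getElem_map, List.getElem_range]
    rcases Nat.lt_or_ge k (j + 1) with h | h
    · rw [if_pos (by omega), if_pos (by omega)]
    · rw [if_neg (by omega), if_neg (by omega)]

lemma pre_fold (A : List Int) (j : Nat) (hj : j ≤ A.length) :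
    (PySem.List.pyRange (j : Int) (A.length : Int) 1).foldl (fun pre i =>
        let pre := PySem.List.pySetD pre (i+1) (PySem.List.pyGetD pre (i+1) 0 + PySem.List.pyGetD pre i 0)
        PySem.List.pySetD pre (i+1) (PySem.List.pyGetD pre (i+1) 0 + PySem.List.pyGetD A i 0))
      (preState A j)
    = preState A A.length := by
  by_cases h : j = A.length
  · subst h
    rw [PySem.List.pyRange_one_eq_nil (by omega)]
    rfl
  · have hj' : j < A.length := by omega
    rw [PySem.List.pyRange_one_cons (by exact_mod_cast hj')]
    simp only [List.foldl_cons]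
    rw [preState_step A j hj']
    have hcast : ((j : Int) + 1) = (((j + 1 : Nat)) : Int) := by push_cast; ring
    rw [hcast]
    exact pre_fold A (j + 1) (by omega)
termination_by A.length - j

lemma preState_zero (A : List Int) : preState A 0 = List.replicate (A.length + 1) 0 := by
  apply List.ext_getElem
  · simp [preState_length]
  intro k hk1 hk2
  simp only [preState, List.getElem_map, List.getElem_range, List.getElem_replicate]
  split_ifs with h
  · simp [Nat.le_zero.mp h]
  · rfl

-- B's head-sum table is the same list as A's finished prefix table
lemma heads_eq (A : List Int) :
    (PySem.List.pyRange 0 ((A.length : Int) + 1) 1).map (fun k => (PySem.List.slice A none (some k)).sum)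
      = preState A A.length := by
  rw [PySem.List.pyRange_one]
  simp only [List.map_map, preState, sub_zero]
  rw [show ((A.length : Int) + 1).toNat = A.length + 1 by omega]
  apply List.map_congr_left
  intro k hk
  rw [List.mem_range] at hk
  simp only [Function.comp_apply, zero_add]
  rw [PySem.List.slice_to_natCast, if_pos (by omega)]

lemma mod_two_if (x : Int) : (if PySem.Int.mod x 2 ≠ 0 then (1 : Int) else 0) = PySem.Int.mod x 2 := by
  rw [PySem.Int.mod_eq_emod_of_pos (by omega)]
  have h1 : 0 ≤ x % 2 := Int.emod_nonneg x (by omega)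
  have h2 : x % 2 < 2 := Int.emod_lt_of_pos x (by omega)
  by_cases h : x % 2 = 0
  · simp [h]
  · have hx : x % 2 = 1 := by omega
    simp [hx]

-- ===== VERDICT (by name: the statement is the Claim_ definition above) =====
theorem solve_spec : Claim_equal_solve := by
  intro A B _hDom _hPre
  unfold Spec_solve
  unfold solve solve_alt
  simp only []
  have hfold : (PySem.List.pyRange 0 (A.length : Int) 1).foldl (fun pre i =>
        let pre := PySem.List.pySetD pre (i+1) (PySem.List.pyGetD pre (i+1) 0 + PySem.List.pyGetD pre i 0)
        PySem.List.pySetD pre (i+1) (PySem.List.pyGetD pre (i+1) 0 + PySem.List.pyGetD A i 0))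
      (List.replicate (A.length + 1) 0) = preState A A.length := by
    rw [← preState_zero A]
    have := pre_fold A 0 (by omega)
    simpa using this
  rw [hfold, heads_eq A]
  congr 1
  funext ans q
  rw [mod_two_if]
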